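-- pv_equiv track=rewrite | github.com/StuartSul/MARG-Python-Study-2020-Assignments | MARG Python Assignment 2 Answers/question3.py | answer
-- ===== SOURCE A (Python) =====
-- def answer(number):
--   count = 0
--   for digit in str(number):
--     if digit == '3' or digit == '6' or digit == '9':
--       count += 1
--   if count > 0:
--     return 'clap' * count
--   else:
--     return str(number)
-- ===== SOURCE B (Python) =====
-- def answer(number):
--   # count the 3/6/9 digits arithmetically, never scanning the decimal string
--   n = abs(number)
--   count = 0
--   while n > 0:
--     if n % 10 in (3, 6, 9):
--       count += 1
--     n //= 10
--   if count > 0: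
--     return 'clap' * count
--   else:
--     return str(number)
-- ===== Notes on version B (the rewrite author's own statement) =====
-- stated objective: alternative
-- what changed: B never scans str(number) to count: it extracts decimal digits arithmetically (n % 10 / n //= 10 on abs(number)) and tests each remainder against {3,6,9}, while A iterates over the characters of str(number); the string is built only for the no-match return.
import Mathlib
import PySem

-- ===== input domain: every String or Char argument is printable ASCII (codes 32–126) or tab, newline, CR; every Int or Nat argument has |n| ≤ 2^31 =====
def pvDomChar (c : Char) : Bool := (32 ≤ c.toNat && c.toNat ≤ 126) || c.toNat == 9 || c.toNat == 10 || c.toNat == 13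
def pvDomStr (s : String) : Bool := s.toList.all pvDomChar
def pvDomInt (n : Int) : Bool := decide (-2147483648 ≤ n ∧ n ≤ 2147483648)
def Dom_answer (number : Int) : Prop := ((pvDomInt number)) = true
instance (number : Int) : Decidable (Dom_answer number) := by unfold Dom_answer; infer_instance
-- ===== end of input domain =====

-- B counts the 3/6/9 digits arithmetically (n % 10 / n //= 10 on abs(number)) instead of
-- scanning the characters of str(number) as A does (objective: alternative; same final branch).

-- ===== PORT A =====
-- one loop over str(number), counting characters that are '3', '6' or '9'
def answer (number : Int) : String :=
  let count : Int :=
    (PySem.Int.toStr number).toList.foldl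
      (fun acc digit => if digit == '3' || digit == '6' || digit == '9' then acc + 1 else acc) 0
  if count > 0 then
    String.ofList (PySem.List.pyRepeat "clap".toList count)   -- 'clap' * count (str repetition, ported by hand via pyRepeat on code points; exact)
  else
    PySem.Int.toStr number

-- ===== PORT B =====
-- the 'while n > 0' loop of Source B; n = abs(number) ≥ 0, so Nat's % and / are exactly
-- Python's % and // here
def answerLoop (n count : Nat) : Nat :=
  if n = 0 then count
  else answerLoop (n / 10) (if n % 10 = 3 ∨ n % 10 = 6 ∨ n % 10 = 9 then count + 1 else count)
termination_by n
decreasing_by exact Nat.div_lt_self (Nat.pos_of_ne_zero (by assumption)) (by omega)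

def answer_alt (number : Int) : String :=
  let count : Nat := answerLoop number.natAbs 0
  if count > 0 then
    String.ofList (PySem.List.pyRepeat "clap".toList (count : Int))   -- 'clap' * count (same hand port as in A; exact)
  else
    PySem.Int.toStr number

-- ===== PRECONDITION & SPEC =====
def Spec_answer (number : Int) (out : String) : Prop := out = answer_alt number
instance (number : Int) (out : String) : Decidable (Spec_answer number out) := by unfold Spec_answer; infer_instance

-- ===== CLAIM (what is proved, stated in full; the proofs are below) =====
def Claim_equal_answer : Prop := ∀ (number : Int), Dom_answer number → Spec_answer number (answer number)

-- ===== LEMMAS AND PROOFS =====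

def pvTarget (d : Char) : Bool := d == '3' || d == '6' || d == '9'

lemma answerLoop_acc (n : Nat) : ∀ c, answerLoop n c = c + answerLoop n 0 := by
  induction n using Nat.strong_induction_on with
  | _ n ih =>
    intro c
    by_cases h : n = 0
    · simp [h, answerLoop]
    · have hlt : n / 10 < n := Nat.div_lt_self (Nat.pos_of_ne_zero h) (by omega)
      conv_lhs => rw [answerLoop, if_neg h]
      conv_rhs => rw [answerLoop, if_neg h]
      by_cases ht : n % 10 = 3 ∨ n % 10 = 6 ∨ n % 10 = 9
      · rw [if_pos ht, if_pos ht]; rw [ih _ hlt]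
        conv_rhs => rw [ih _ hlt]
        omega
      · rw [if_neg ht, if_neg ht, ih _ hlt]

lemma digitChar_target (n : Nat) (h : n < 10) :
    pvTarget (Nat.digitChar n) = decide (n = 3 ∨ n = 6 ∨ n = 9) := by
  interval_cases n <;> decide

lemma countP_toDigitsCore (fuel : Nat) : ∀ (n : Nat) (acc : List Char), n < fuel →
    (Nat.toDigitsCore 10 fuel n acc).countP pvTarget
      = (if n % 10 = 3 ∨ n % 10 = 6 ∨ n % 10 = 9 then 1 else 0)
        + answerLoop (n / 10) 0 + acc.countP pvTarget := by
  induction fuel with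
  | zero => intro n acc h; omega
  | succ f ih =>
    intro n acc h
    rw [Nat.toDigitsCore]
    by_cases h0 : n / 10 = 0
    · rw [if_pos h0, h0, answerLoop, if_pos rfl]
      rw [List.countP_cons, digitChar_target _ (Nat.mod_lt _ (by omega))]
      by_cases ht : n % 10 = 3 ∨ n % 10 = 6 ∨ n % 10 = 9
      · simp [ht]; omega
      · simp [ht]
    · have hn : 0 < n := by
        rcases Nat.eq_zero_or_pos n with h'|h'
        · exact absurd (by simp [h']) h0
        · exact h'
      have hlt : n / 10 < f := by
        have := Nat.div_lt_self hn (show (1:Nat) < 10 by omega)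
        omega
      rw [if_neg h0, ih _ _ hlt]
      rw [List.countP_cons, digitChar_target _ (Nat.mod_lt _ (by omega))]
      have hstep : answerLoop (n / 10) 0
          = (if n / 10 % 10 = 3 ∨ n / 10 % 10 = 6 ∨ n / 10 % 10 = 9 then 1 else 0)
            + answerLoop (n / 10 / 10) 0 := by
        conv_lhs => rw [answerLoop, if_neg h0]
        by_cases ht : n / 10 % 10 = 3 ∨ n / 10 % 10 = 6 ∨ n / 10 % 10 = 9
        · rw [if_pos ht, answerLoop_acc (n / 10 / 10) (0 + 1)]
        · rw [if_neg ht]; omega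
      rw [hstep]
      by_cases ht : n % 10 = 3 ∨ n % 10 = 6 ∨ n % 10 = 9
      · simp [ht]; omega
      · simp [ht]

lemma countP_toDigits (n : Nat) :
    (Nat.toDigits 10 n).countP pvTarget = answerLoop n 0 := by
  rw [Nat.toDigits, countP_toDigitsCore (n + 1) n [] (by omega)]
  by_cases h0 : n = 0
  · subst h0; rw [answerLoop]; simp
  · conv_rhs => rw [answerLoop, if_neg h0]
    by_cases ht : n % 10 = 3 ∨ n % 10 = 6 ∨ n % 10 = 9
    · rw [if_pos ht, answerLoop_acc (n / 10) (0 + 1)]; simp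
    · rw [if_neg ht]; simp

lemma countP_toChars (number : Int) :
    (PySem.Int.toChars number).countP pvTarget = answerLoop number.natAbs 0 := by
  rw [PySem.Int.toChars]
  by_cases hneg : number < 0
  · rw [if_pos hneg, List.countP_cons]
    have : pvTarget '-' = false := by decide
    rw [this, countP_toDigits]
    simp
  · rw [if_neg hneg]
    have : number.toNat = number.natAbs := by omega
    rw [this, countP_toDigits]

-- ===== VERDICT (by name: the statement is the Claim_ definition above) =====
theorem answer_spec : Claim_equal_answer := by
  intro number _
  unfold Spec_answer answer answer_alt
  have hfold : (PySem.Int.toStr number).toList.foldl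
      (fun acc digit => if digit == '3' || digit == '6' || digit == '9' then acc + 1 else acc) 0
      = ((answerLoop number.natAbs 0 : Nat) : Int) := by
    have := PySem.List.foldl_count_if pvTarget (PySem.Int.toStr number).toList 0
    rw [PySem.Int.toList_toStr] at this ⊢
    simpa [pvTarget, countP_toChars number] using this
  rw [hfold]
  by_cases h : 0 < answerLoop number.natAbs 0
  · rw [if_pos (by exact_mod_cast h), if_pos h]
  · rw [if_neg (by exact_mod_cast h), if_neg h]
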